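-- pv_equiv track=rewrite | github.com/babasveeramallu/ncl-ctf-pptx | backend/modules/crypto_service.py | _symbol_pattern
-- ===== SOURCE A (Python) =====
-- from typing import Any, Callable, Dict, List, Tuple
--
-- def _symbol_pattern(values: List[int]) -> Tuple[int, ...]:
--     seen: Dict[int, int] = {}
--     out: List[int] = []
--     next_idx = 0
--     for value in values:
--         if value not in seen:
--             seen[value] = next_idx
--             next_idx += 1
--         out.append(seen[value])
--     return tuple(out)
-- ===== SOURCE B (Python) =====
-- def _symbol_pattern(values):
--     # Each value's pattern index = number of distinct values in the prefix
--     # ending at its first occurrence, minus one.  No mapping table is built.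
--     return tuple(len(set(values[:values.index(v) + 1])) - 1 for v in values)
-- ===== Notes on version B (the rewrite author's own statement) =====
-- stated objective: alternative
-- what changed: Drops the online dict that discovers and assigns indices; instead each element's pattern index is computed independently by a closed form: the count of distinct values in the prefix ending at that value's first occurrence, minus one.
import Mathlib
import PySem

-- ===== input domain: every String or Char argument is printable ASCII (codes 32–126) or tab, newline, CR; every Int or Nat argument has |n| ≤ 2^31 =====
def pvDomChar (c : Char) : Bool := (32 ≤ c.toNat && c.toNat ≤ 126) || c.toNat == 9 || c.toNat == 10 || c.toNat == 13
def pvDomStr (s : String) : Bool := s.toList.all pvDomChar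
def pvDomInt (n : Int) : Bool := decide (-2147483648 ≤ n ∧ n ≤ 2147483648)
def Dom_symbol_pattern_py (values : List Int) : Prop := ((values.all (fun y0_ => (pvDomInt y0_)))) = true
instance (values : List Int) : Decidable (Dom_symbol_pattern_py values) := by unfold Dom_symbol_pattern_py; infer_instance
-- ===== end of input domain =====

-- B drops A's online dict of indices: each element's pattern index is instead a per-element
-- closed form (distinct-count of the prefix ending at its first occurrence, minus one);
-- objective: alternative (B is O(n^2), A is O(n)).

-- ===== PORT A =====
-- the 'for value in values' loop; state (seen, out, next_idx).  'out.append(seen[value])':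
-- seen[value] is always present at that point, so '.getD 0' only totalizes the impossible KeyError.
def symPatA_loop : List Int → PySem.Dict Int Int → List Int → Int → List Int
  | [], _, out, _ => out
  | value :: rest, seen, out, next_idx =>
    if seen.contains value then
      symPatA_loop rest seen (out ++ [(seen.get? value).getD 0]) next_idx
    else
      let seen' := seen.insert value next_idx
      symPatA_loop rest seen' (out ++ [(seen'.get? value).getD 0]) (next_idx + 1)

def symbol_pattern_py (values : List Int) : List Int :=
  symPatA_loop values PySem.Dict.empty [] 0

-- ===== PORT B =====
-- tuple(len(set(values[:values.index(v) + 1])) - 1 for v in values).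
-- 'values.index(v)' always succeeds (v is drawn from values), so the 'none' branch is unreachable.
def symbol_pattern_py_alt (values : List Int) : List Int :=
  values.map (fun v =>
    match PySem.List.index? values v with
    | some j =>
        ((PySem.Set.ofList (PySem.List.slice values (some 0) (some ((j : Int) + 1)))).length : Int) - 1
    | none => 0)

-- ===== PRECONDITION & SPEC =====
def Spec_symbol_pattern_py (values : List Int) (out : List Int) : Prop := out = symbol_pattern_py_alt values
instance (values : List Int) (out : List Int) : Decidable (Spec_symbol_pattern_py values out) := by unfold Spec_symbol_pattern_py; infer_instance

-- ===== CLAIM (what is proved, stated in full; the proofs are below) =====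
def Claim_equal_symbol_pattern_py : Prop := ∀ (values : List Int), Dom_symbol_pattern_py values → Spec_symbol_pattern_py values (symbol_pattern_py values)

-- ===== LEMMAS AND PROOFS =====

-- idxOf is stable under appending a tail, for elements already present
theorem idxOf_append_left {α : Type} [DecidableEq α] (d t : List α) (v : α) (hv : v ∈ d) :
    (d ++ t).idxOf v = d.idxOf v := by
  induction d with
  | nil => cases hv
  | cons x d ih =>
    by_cases hx : x = v
    · simp [hx]
    · have : v ∈ d := by cases hv with
        | head => exact absurd rfl hx
        | tail _ h => exact h
      simp [hx, ih this]

theorem idxOf_append_self {α : Type} [DecidableEq α] (d : List α) (v : α) (hv : v ∉ d) :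
    (d ++ [v]).idxOf v = d.length := by
  induction d with
  | nil => simp
  | cons x d ih =>
    have hx : x ≠ v := fun h => hv (h ▸ List.mem_cons_self)
    have : v ∉ d := fun h => hv (List.mem_cons_of_mem _ h)
    simp [hx, ih this]

-- Set.update only appends
theorem prefix_update (l : List Int) (d : PySem.Set Int) :
    d <+: PySem.Set.update d l := by
  induction l generalizing d with
  | nil => simp [PySem.Set.update]
  | cons x l ih =>
    have h1 : d <+: PySem.Set.add d x := by
      unfold PySem.Set.add
      split_ifs <;> simp
    have h2 : PySem.Set.add d x <+: PySem.Set.update (PySem.Set.add d x) l := ih _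
    have : PySem.Set.update d (x :: l) = PySem.Set.update (PySem.Set.add d x) l := rfl
    rw [this]
    exact h1.trans h2

theorem idxOf_update_of_mem (l : List Int) (d : PySem.Set Int) (v : Int) (hv : v ∈ d) :
    (PySem.Set.update d l).idxOf v = d.idxOf v := by
  obtain ⟨t, ht⟩ := prefix_update l d
  rw [← ht, idxOf_append_left d t v hv]

-- the loop invariant for A: seen maps each processed value to its index in the processed dedup d
theorem symPatA_loop_eq (rest : List Int) :
    ∀ (seen : PySem.Dict Int Int) (out : List Int) (d : List Int),
    d.Nodup →
    (∀ v, seen.get? v = if v ∈ d then some ((d.idxOf v : Nat) : Int) else none) →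
    symPatA_loop rest seen out d.length =
      out ++ rest.map (fun v => (((PySem.Set.update d rest).idxOf v : Nat) : Int)) := by
  induction rest with
  | nil => intro seen out d hnd hget; simp [symPatA_loop, PySem.Set.update]
  | cons v rest ih =>
    intro seen out d hnd hget
    have hcont : seen.contains v = (v ∈ d : Bool) := by
      rw [PySem.Dict.contains_eq_isSome_get?, hget v]
      by_cases h : v ∈ d <;> simp [h]
    have hupd : PySem.Set.update d (v :: rest) = PySem.Set.update (PySem.Set.add d v) rest := rfl
    by_cases hv : v ∈ d
    · -- value already seen: d unchanged
      have hadd : PySem.Set.add d v = d := by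
        unfold PySem.Set.add
        simp [hv]
      rw [symPatA_loop, if_pos (by simp [hcont, hv])]
      rw [ih seen _ d hnd hget, hget v, if_pos hv]
      rw [hupd, hadd]
      simp [idxOf_update_of_mem rest d v hv]
    · -- new value: d grows to d ++ [v]
      have hadd : PySem.Set.add d v = d ++ [v] := by
        unfold PySem.Set.add
        simp [hv]
      have hnd' : (d ++ [v]).Nodup := by
        simp [List.nodup_append, hnd]
        exact fun a ha h => hv (h ▸ ha)
      have hget' : ∀ w, (seen.insert v (d.length : Int)).get? w =
          if w ∈ d ++ [v] then some (((d ++ [v]).idxOf w : Nat) : Int) else none := by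
        intro w
        rw [PySem.Dict.get?_insert]
        by_cases hw : w = v
        · subst hw
          simp [idxOf_append_self d w hv]
        · rw [if_neg hw, hget w]
          by_cases hwd : w ∈ d
          · simp [hwd, idxOf_append_left d [v] w hwd]
          · have : w ∉ d ++ [v] := by simp [hwd, hw]
            simp [hwd, this]
      rw [symPatA_loop, if_neg (by simp [hcont, hv])]
      have hlen : (d.length : Int) + 1 = ((d ++ [v]).length : Int) := by simp
      rw [hlen, ih _ _ (d ++ [v]) hnd' hget']
      have hgv : (seen.insert v (d.length : Int)).get? v = some (d.length : Int) :=
        PySem.Dict.get?_insert_self _ _ _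
      have hidx : (PySem.Set.update (d ++ [v]) rest).idxOf v = d.length := by
        have hvm : v ∈ d ++ [v] := by simp
        rw [idxOf_update_of_mem rest _ v hvm, idxOf_append_self d v hv]
      rw [hupd, hadd]
      simp [hgv, hidx]

-- B's per-element formula: for v ∈ values at first index j, the distinct-count of the
-- prefix of length j+1 is (dedup values).idxOf v + 1.
theorem dedup_take_first (values : List Int) (v : Int) (j : Nat)
    (hj : PySem.List.index? values v = some j) :
    (PySem.List.dedup (values.take (j + 1))).length = (PySem.List.dedup values).idxOf v + 1 := by
  obtain ⟨hk, hget, hbefore⟩ := PySem.List.getElem_of_index?_eq_some hj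
  have hvpre : v ∉ values.take j := by
    intro hmem
    obtain ⟨i, hi, hgi⟩ := List.mem_iff_getElem.1 hmem
    have hij : i < j := lt_of_lt_of_le hi (by simp)
    exact hbefore i hij (by simpa [List.getElem_take] using hgi)
  have htake : values.take (j + 1) = values.take j ++ [v] := by
    rw [List.take_add_one]
    simp [List.getElem?_eq_getElem hk, hget]
  have hsplit : values = values.take j ++ v :: values.drop (j + 1) := by
    conv_lhs => rw [← List.take_append_drop j values]
    congr 1
    rw [List.drop_eq_getElem_cons hk, hget]
  simp only [PySem.List.dedup_eq_ofList]
  set d1 := PySem.Set.ofList (values.take j) with hd1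
  have hvd1 : v ∉ d1 := fun h => hvpre ((PySem.Set.mem_ofList _ _).1 h)
  have hadd : PySem.Set.add d1 v = d1 ++ [v] := by
    unfold PySem.Set.add
    simp [hvd1]
  have h1 : PySem.Set.ofList (values.take (j + 1)) = d1 ++ [v] := by
    rw [htake, PySem.Set.ofList_eq_foldl, List.foldl_append]
    simp only [List.foldl_cons, List.foldl_nil]
    rw [← PySem.Set.ofList_eq_foldl, ← hd1, hadd]
  have h2 : PySem.Set.ofList values = PySem.Set.update (d1 ++ [v]) (values.drop (j + 1)) := by
    conv_lhs => rw [hsplit]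
    rw [PySem.Set.ofList_eq_foldl, List.foldl_append]
    simp only [List.foldl_cons]
    rw [← PySem.Set.ofList_eq_foldl, ← hd1, hadd]
    rfl
  have hidx : (PySem.Set.ofList values).idxOf v = d1.length := by
    rw [h2, idxOf_update_of_mem _ _ v (by simp), idxOf_append_self d1 v hvd1]
  rw [h1, hidx]
  simp

-- ===== VERDICT (by name: the statement is the Claim_ definition above) =====
theorem symbol_pattern_py_spec : Claim_equal_symbol_pattern_py := by
  intro values _
  show symbol_pattern_py values = symbol_pattern_py_alt values
  have hA : symbol_pattern_py values
      = values.map (fun v => (((PySem.List.dedup values).idxOf v : Nat) : Int)) := by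
    have h := symPatA_loop_eq values PySem.Dict.empty [] [] List.nodup_nil
      (fun v => by simp [PySem.Dict.get?_empty])
    have horder : PySem.Set.update ([] : PySem.Set Int) values = PySem.List.dedup values := by
      simp [PySem.Set.update, PySem.List.dedup_eq_ofList, PySem.Set.ofList_eq_foldl]
    simpa [symbol_pattern_py, horder] using h
  rw [hA]
  simp only [symbol_pattern_py_alt]
  refine List.map_congr_left ?_
  intro v hv
  obtain ⟨j, hj⟩ := Option.isSome_iff_exists.1 ((PySem.List.index?_isSome_iff values v).2 hv)
  rw [hj]
  show ((PySem.List.dedup values).idxOf v : Nat) = ((PySem.Set.ofList (PySem.List.slice values (some 0) (some ((j : Int) + 1)))).length : Int) - 1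
  have hslice : PySem.List.slice values (some (0 : Int)) (some ((j : Int) + 1))
      = values.take (j + 1) := by
    have : ((j : Int) + 1) = ((j + 1 : Nat) : Int) := by push_cast; ring
    rw [this, PySem.List.slice_zero_start, PySem.List.slice_to_natCast]
  rw [hslice]
  have hlen := dedup_take_first values v j hj
  rw [show PySem.Set.ofList (values.take (j + 1)) = PySem.List.dedup (values.take (j + 1)) from
    (PySem.List.dedup_eq_ofList _).symm]
  rw [hlen]
  push_cast
  ring
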